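-- pv_equiv track=rewrite | github.com/goaliaga/ET | Funciones.py | comprobarAsiento
-- ===== SOURCE A (Python) =====
-- def comprobarAsiento(arreglo,num_asiento):
--     x = 0
--     for f in range(10):
--         for c in range(10):
--             x = x + 1
--             if str(x) == str(num_asiento):
--                 if arreglo[f][c] == 'XXX':
--                     return False
--     return True
-- ===== SOURCE B (Python) =====
-- def comprobarAsiento(arreglo, num_asiento):
--     if 1 <= num_asiento <= 100:
--         f, c = divmod(num_asiento - 1, 10)
--         return arreglo[f][c] != 'XXX'
--     return True
-- ===== Notes on version B (the rewrite author's own statement) =====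
-- stated objective: simpler
-- what changed: Replaces the 100-iteration nested grid scan comparing str(x) with str(num_asiento) by a direct arithmetic computation of the seat's row and column via divmod(num_asiento-1, 10), indexing the grid once.
import Mathlib
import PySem

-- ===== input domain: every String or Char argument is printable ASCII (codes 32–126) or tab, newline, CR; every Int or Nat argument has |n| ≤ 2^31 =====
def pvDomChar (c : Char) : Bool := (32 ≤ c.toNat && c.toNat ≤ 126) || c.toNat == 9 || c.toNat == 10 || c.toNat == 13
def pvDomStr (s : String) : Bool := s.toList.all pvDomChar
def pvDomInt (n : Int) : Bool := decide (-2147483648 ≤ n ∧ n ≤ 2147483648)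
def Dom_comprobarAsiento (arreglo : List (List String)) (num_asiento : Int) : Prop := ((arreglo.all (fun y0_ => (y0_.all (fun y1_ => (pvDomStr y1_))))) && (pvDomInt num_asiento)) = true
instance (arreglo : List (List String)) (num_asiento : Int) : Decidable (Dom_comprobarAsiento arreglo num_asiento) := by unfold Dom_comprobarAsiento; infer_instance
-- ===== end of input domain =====

-- B replaces A's 100-step nested grid scan (comparing str(x) with str(num_asiento)) by a direct
-- divmod computation of the seat's row and column, indexing the grid once (objective: simpler).

-- ===== PORT A =====
-- arreglo[f][c] as an Option (none exactly where Python raises IndexError; excluded by Pre_)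
def pvCellA (arreglo : List (List String)) (f c : Int) : Option String :=
  (PySem.List.pyGet? arreglo f).bind (fun row => PySem.List.pyGet? row c)

-- inner 'for c in range(10)' loop: (some b, x) on early return, (none, x) when it falls through
def pvInnerA (arreglo : List (List String)) (num_asiento : Int) (f : Int) :
    List Int → Int → Option Bool × Int
  | [], x => (none, x)
  | c :: cs, x =>
    let x' := x + 1
    if PySem.Int.toStr x' == PySem.Int.toStr num_asiento then
      if pvCellA arreglo f c == some "XXX" then (some false, x')
      else pvInnerA arreglo num_asiento f cs x'
    else pvInnerA arreglo num_asiento f cs x'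

-- outer 'for f in range(10)' loop
def pvOuterA (arreglo : List (List String)) (num_asiento : Int) :
    List Int → Int → Bool
  | [], _ => true
  | f :: fs, x =>
    match pvInnerA arreglo num_asiento f (PySem.List.pyRange 0 10 1) x with
    | (some b, _) => b
    | (none, x') => pvOuterA arreglo num_asiento fs x'

def comprobarAsiento (arreglo : List (List String)) (num_asiento : Int) : Bool :=
  pvOuterA arreglo num_asiento (PySem.List.pyRange 0 10 1) 0

-- ===== PORT B =====
def comprobarAsiento_alt (arreglo : List (List String)) (num_asiento : Int) : Bool :=
  if 1 ≤ num_asiento ∧ num_asiento ≤ 100 then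
    let f := PySem.Int.floordiv (num_asiento - 1) 10
    let c := PySem.Int.mod (num_asiento - 1) 10
    match (PySem.List.pyGet? arreglo f).bind (fun row => PySem.List.pyGet? row c) with
    | some s => !(s == "XXX")
    | none => true   -- IndexError in Python; outside Pre_
  else true

-- ===== PRECONDITION & SPEC =====
-- Pre_ excludes exactly the inputs where both Pythons raise IndexError: a seat number in 1..100
-- whose row/column lies outside the grid.
def Pre_comprobarAsiento (arreglo : List (List String)) (num_asiento : Int) : Prop :=
  1 ≤ num_asiento → num_asiento ≤ 100 →
    ((num_asiento - 1).toNat / 10 < arreglo.length ∧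
     (num_asiento - 1).toNat % 10 < (arreglo.getD ((num_asiento - 1).toNat / 10) []).length)
instance (arreglo : List (List String)) (num_asiento : Int) : Decidable (Pre_comprobarAsiento arreglo num_asiento) := by unfold Pre_comprobarAsiento; infer_instance

def pvWitness_comprobarAsiento : List (List String) × Int := ([["XXX"]], 1)

def Spec_comprobarAsiento (arreglo : List (List String)) (num_asiento : Int) (out : Bool) : Prop := out = comprobarAsiento_alt arreglo num_asiento
instance (arreglo : List (List String)) (num_asiento : Int) (out : Bool) : Decidable (Spec_comprobarAsiento arreglo num_asiento out) := by unfold Spec_comprobarAsiento; infer_instance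

-- ===== CLAIM (what is proved, stated in full; the proofs are below) =====
def Claim_equal_comprobarAsiento : Prop := ∀ (arreglo : List (List String)) (num_asiento : Int), Dom_comprobarAsiento arreglo num_asiento → Pre_comprobarAsiento arreglo num_asiento → Spec_comprobarAsiento arreglo num_asiento (comprobarAsiento arreglo num_asiento)

-- ===== LEMMAS AND PROOFS =====

-- value of a most-significant-first decimal digit string, used to invert Nat.toDigits 10
def pvValNat (a n : Nat) : Nat :=
  if n < 10 then 10 * a + n else 10 * pvValNat a (n / 10) + n % 10
decreasing_by exact Nat.div_lt_self (by omega) (by omega)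

def pvStep (s : Nat) (ch : Char) : Nat := 10 * s + (ch.toNat - 48)

lemma pvToDigitsCore_append (b : Nat) :
    ∀ (f n : Nat) (acc : List Char),
      Nat.toDigitsCore b f n acc = Nat.toDigitsCore b f n [] ++ acc := by
  intro f
  induction f with
  | zero => intro n acc; simp [Nat.toDigitsCore]
  | succ f ih =>
    intro n acc
    simp only [Nat.toDigitsCore]
    by_cases h : n / b = 0
    · simp [h]
    · simp only [h, if_false]
      rw [ih (n / b) (Nat.digitChar (n % b) :: acc), ih (n / b) [Nat.digitChar (n % b)]]
      simp

lemma pvDigitChar_toNat (d : Nat) (hd : d < 10) : (Nat.digitChar d).toNat - 48 = d := by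
  interval_cases d <;> decide

lemma pvFoldl_toDigitsCore :
    ∀ (f n a : Nat), n < f →
      List.foldl pvStep a (Nat.toDigitsCore 10 f n []) = pvValNat a n := by
  intro f
  induction f with
  | zero => omega
  | succ f ih =>
    intro n a h
    simp only [Nat.toDigitsCore]
    by_cases h10 : n / 10 = 0
    · have hn : n < 10 := by omega
      simp [h10, pvStep, pvValNat, hn, pvDigitChar_toNat _ (by omega : n % 10 < 10)]
    · simp only [h10, if_false]
      rw [pvToDigitsCore_append, List.foldl_append, ih (n / 10) a (by omega)]
      simp only [List.foldl, pvStep, pvDigitChar_toNat _ (show n % 10 < 10 by omega)]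
      conv_rhs => rw [pvValNat]
      rw [if_neg (by omega)]

lemma pvValNat_zero (n : Nat) : pvValNat 0 n = n := by
  induction n using Nat.strong_induction_on with
  | _ n ih =>
    rw [pvValNat]
    by_cases h : n < 10
    · simp [h]
    · simp [h, ih (n / 10) (Nat.div_lt_self (by omega) (by omega))]
      omega

lemma pvToDigits_inj (m n : Nat) (h : Nat.toDigits 10 m = Nat.toDigits 10 n) : m = n := by
  have hm := pvFoldl_toDigitsCore (m + 1) m 0 (by omega)
  have hn := pvFoldl_toDigitsCore (n + 1) n 0 (by omega)
  rw [pvValNat_zero] at hm hn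
  unfold Nat.toDigits at h
  rw [← hm, ← hn, h]

lemma pvToDigitsCore_head :
    ∀ (f n : Nat) (acc : List Char), 0 < f →
      ∃ (d : Nat) (t : List Char), d < 10 ∧ Nat.toDigitsCore 10 f n acc = Nat.digitChar d :: t := by
  intro f
  induction f with
  | zero => omega
  | succ f ih =>
    intro n acc _
    simp only [Nat.toDigitsCore]
    by_cases h : n / 10 = 0
    · exact ⟨n % 10, acc, Nat.mod_lt _ (by omega), by simp [h]⟩
    · simp only [h, if_false]
      rcases Nat.eq_zero_or_pos f with hf | hf
      · subst hf
        exact ⟨n % 10, acc, Nat.mod_lt _ (by omega), by simp [Nat.toDigitsCore]⟩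
      · exact ih (n / 10) _ hf

lemma pvDigitChar_ne_dash (d : Nat) (hd : d < 10) : Nat.digitChar d ≠ '-' := by
  interval_cases d <;> decide

lemma pvToDigits_head (n : Nat) :
    ∃ (d : Nat) (t : List Char), d < 10 ∧ Nat.toDigits 10 n = Nat.digitChar d :: t :=
  pvToDigitsCore_head (n + 1) n [] (by omega)

lemma pvToChars_inj (a b : Int) (h : PySem.Int.toChars a = PySem.Int.toChars b) : a = b := by
  unfold PySem.Int.toChars at h
  by_cases ha : a < 0 <;> by_cases hb : b < 0 <;> simp [ha, hb] at h
  · have := pvToDigits_inj _ _ h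
    omega
  · obtain ⟨d, t, hd, he⟩ := pvToDigits_head b.toNat
    rw [he] at h
    exact absurd (List.head_eq_of_cons_eq h).symm (pvDigitChar_ne_dash d hd)
  · obtain ⟨d, t, hd, he⟩ := pvToDigits_head a.toNat
    rw [he] at h
    exact absurd (List.head_eq_of_cons_eq h) (pvDigitChar_ne_dash d hd)
  · have := pvToDigits_inj _ _ h
    omega

lemma pvToStr_beq (a b : Int) :
    (PySem.Int.toStr a == PySem.Int.toStr b) = decide (a = b) := by
  by_cases h : a = b
  · simp [h]
  · simp only [h, decide_false, beq_eq_false_iff_ne, ne_eq]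
    intro he
    exact h (pvToChars_inj a b (by
      have := congrArg String.toList he
      simpa [PySem.Int.toList_toStr] using this))

lemma pvInnerA_spec (arreglo : List (List String)) (num f : Int) :
    ∀ (k : Nat) (j x : Int), j = 10 - (k : Int) → k ≤ 10 → x = f * 10 + j →
      pvInnerA arreglo num f (PySem.List.pyRange j 10 1) x =
        if x < num ∧ num ≤ f * 10 + 10 then
          (if pvCellA arreglo f (num - f * 10 - 1) == some "XXX" then (some false, num)
           else (none, f * 10 + 10))
        else (none, f * 10 + 10) := by
  intro k
  induction k with
  | zero =>
    intro j x hj hk hx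
    rw [PySem.List.pyRange_one_eq_nil (by omega)]
    simp only [pvInnerA]
    rw [if_neg (by omega)]
    simp only [Prod.mk.injEq, true_and]
    omega
  | succ k ih =>
    intro j x hj hk hx
    rw [PySem.List.pyRange_one_cons (by omega)]
    simp only [pvInnerA, pvToStr_beq]
    by_cases hm : x + 1 = num
    · have hc : num - f * 10 - 1 = j := by omega
      rw [hc, decide_eq_true hm, if_pos rfl]
      cases hxx : (pvCellA arreglo f j == some "XXX")
      · simp only [Bool.false_eq_true, if_false]
        rw [ih (j + 1) (x + 1) (by omega) (by omega) (by omega)]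
        rw [if_neg (by omega), if_pos (by omega)]
      · simp only [if_true]
        rw [if_pos (by omega)]
        simp only [Prod.mk.injEq, true_and]
        exact hm
    · rw [if_neg (by simp [hm])]
      rw [ih (j + 1) (x + 1) (by omega) (by omega) (by omega)]
      have he : (x + 1 < num ∧ num ≤ f * 10 + 10) = (x < num ∧ num ≤ f * 10 + 10) := by
        apply propext; constructor <;> (intro h; omega)
      simp only [he]

lemma pvOuterA_spec (arreglo : List (List String)) (num : Int) :
    ∀ (k : Nat) (i x : Int), i = 10 - (k : Int) → k ≤ 10 → x = i * 10 →
      pvOuterA arreglo num (PySem.List.pyRange i 10 1) x =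
        if i * 10 < num ∧ num ≤ 100 ∧
            (pvCellA arreglo (PySem.Int.floordiv (num - 1) 10) (PySem.Int.mod (num - 1) 10)
              == some "XXX") = true then false
        else true := by
  intro k
  induction k with
  | zero =>
    intro i x hi hk hx
    rw [PySem.List.pyRange_one_eq_nil (by omega)]
    simp only [pvOuterA]
    rw [if_neg (by rintro ⟨h1, h2, _⟩; omega)]
  | succ k ih =>
    intro i x hi hk hx
    rw [PySem.List.pyRange_one_cons (by omega)]
    simp only [pvOuterA]
    rw [pvInnerA_spec arreglo num i 10 0 x (by norm_num) (by omega) (by omega)]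
    by_cases hcase : x < num ∧ num ≤ i * 10 + 10
    · rw [if_pos hcase]
      have hf : PySem.Int.floordiv (num - 1) 10 = i := by
        rw [PySem.Int.floordiv_eq_iff_of_pos (by omega)]
        omega
      have hmd : PySem.Int.mod (num - 1) 10 = num - i * 10 - 1 := by
        have := PySem.Int.floordiv_mul_add_mod (num - 1) 10
        rw [hf] at this
        omega
      rw [hf, hmd]
      cases hxx : (pvCellA arreglo i (num - i * 10 - 1) == some "XXX")
      · simp only [Bool.false_eq_true, if_false]
        show pvOuterA arreglo num (PySem.List.pyRange (i + 1) 10 1) (i * 10 + 10) = _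
        rw [ih (i + 1) (i * 10 + 10) (by omega) (by omega) (by ring)]
        rw [if_neg (by rintro ⟨h1, h2, _⟩; omega), if_neg (by rintro ⟨h1, h2, h3⟩; simp at h3)]
      · simp only [if_true]
        rw [if_pos ⟨by omega, by omega, by simp⟩]
    · rw [if_neg hcase]
      show pvOuterA arreglo num (PySem.List.pyRange (i + 1) 10 1) (i * 10 + 10) = _
      rw [ih (i + 1) (i * 10 + 10) (by omega) (by omega) (by ring)]
      have he : ((i + 1) * 10 < num ∧ num ≤ 100 ∧
            (pvCellA arreglo (PySem.Int.floordiv (num - 1) 10) (PySem.Int.mod (num - 1) 10)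
              == some "XXX") = true)
          = (i * 10 < num ∧ num ≤ 100 ∧
            (pvCellA arreglo (PySem.Int.floordiv (num - 1) 10) (PySem.Int.mod (num - 1) 10)
              == some "XXX") = true) := by
        apply propext
        constructor <;> (rintro ⟨h1, h2, h3⟩; exact ⟨by omega, h2, h3⟩)
      simp only [he]

-- ===== VERDICT (by name: the statement is the Claim_ definition above) =====
theorem comprobarAsiento_spec : Claim_equal_comprobarAsiento := by
  intro a n _ hpre
  unfold Spec_comprobarAsiento
  unfold comprobarAsiento
  rw [pvOuterA_spec a n 10 0 0 (by norm_num) (by omega) (by norm_num)]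
  unfold comprobarAsiento_alt
  by_cases h : 1 ≤ n ∧ n ≤ 100
  · rw [if_pos h]
    obtain ⟨hrow, hcol⟩ := hpre h.1 h.2
    have hn1 : n - 1 = (((n - 1).toNat : Nat) : Int) := by omega
    have hf : PySem.Int.floordiv (n - 1) 10 = (((n - 1).toNat / 10 : Nat) : Int) := by
      rw [hn1]; exact_mod_cast PySem.Int.floordiv_natCast (n - 1).toNat 10
    have hc : PySem.Int.mod (n - 1) 10 = (((n - 1).toNat % 10 : Nat) : Int) := by
      rw [hn1]; exact_mod_cast PySem.Int.mod_natCast (n - 1).toNat 10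
    have hrowv : PySem.List.pyGet? a (PySem.Int.floordiv (n - 1) 10)
        = some (a[(n - 1).toNat / 10]'hrow) := by
      rw [hf, PySem.List.pyGet?_natCast, List.getElem?_eq_getElem hrow]
    have hcol' : (n - 1).toNat % 10 < (a[(n - 1).toNat / 10]'hrow).length := by
      rwa [List.getD_eq_getElem?_getD, List.getElem?_eq_getElem hrow] at hcol
    have hcell : PySem.List.pyGet? (a[(n - 1).toNat / 10]'hrow) (PySem.Int.mod (n - 1) 10)
        = some ((a[(n - 1).toNat / 10]'hrow)[(n - 1).toNat % 10]'hcol') := by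
      rw [hc, PySem.List.pyGet?_natCast, List.getElem?_eq_getElem hcol']
    simp only [pvCellA, hrowv, Option.bind_some, hcell]
    cases hs : ((a[(n - 1).toNat / 10]'hrow)[(n - 1).toNat % 10]'hcol') == "XXX"
    · have hnot : ¬ (0 * 10 < n ∧ n ≤ 100 ∧
          (some (a[(n - 1).toNat / 10]'hrow)[(n - 1).toNat % 10] == some "XXX") = true) := by
        rintro ⟨_, _, h3⟩
        exact ne_of_beq_false hs (Option.some.inj (eq_of_beq h3))
      rw [if_neg hnot]
      rfl
    · rw [if_pos ⟨by omega, h.2, by rw [eq_of_beq hs]; simp⟩]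
      rfl
  · rw [if_neg h]
    rw [if_neg (by rintro ⟨h1, h2, _⟩; exact h ⟨by omega, h2⟩)]
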